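-- pv_equiv track=rewrite | github.com/Bo-Zhong-00/BGCCGB | genomes_test.py | merge_ones
-- ===== SOURCE A (Python) =====
-- def merge_ones(arr, k, v):
--     merge = [0 for _ in range(len(arr))]
--     last_one_index = -1
--     for i in range(len(arr)):
--         l = arr[i]
--         if l == 0:
--             merge[i] = 0
--         elif l == 1 and last_one_index != -1:
--             merge[i] = 1
--             if i - last_one_index <= k:
--                 for j in range(last_one_index, i):
--                     merge[j] = 1
--             last_one_index = i
--         else:
--             merge[i] = 1
--             last_one_index = i
--     delect = merge
--     count = 0
--     for i in range(len(delect)):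
--         if delect[i] == 1:
--             count += 1
--         else:
--             if count > 0 and count < v:
--                 for j in range(i - count, i):
--                     delect[j] = 0
--             count = 0
--
--     if count > 0 and count < v:
--         for j in range(len(delect) - count, len(delect)):
--             delect[j] = 0
--
--     return delect
-- ===== SOURCE B (Python) =====
-- def merge_ones(arr, k, v):
--     n = len(arr)
--     # Build maximal one-runs as half-open intervals [s, e) directly from the
--     # nonzero positions: a nonzero at i joins the current run when it is
--     # adjacent to it, or when it is literally 1 and within distance k of the
--     # run's last nonzero (which bridges the zero gap in between).
--     runs = []
--     cur = None
--     for i, x in enumerate(arr):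
--         if x == 0:
--             continue
--         if cur is not None and (i == cur[1] or (x == 1 and i - (cur[1] - 1) <= k)):
--             cur = (cur[0], i + 1)
--         else:
--             if cur is not None:
--                 runs.append(cur)
--             cur = (i, i + 1)
--     if cur is not None:
--         runs.append(cur)
--     # Emit from the run table: zero gaps, and each run kept only if long enough.
--     out = []
--     pos = 0
--     for s, e in runs:
--         out.extend([0] * (s - pos))
--         out.extend([1] * (e - s) if e - s >= v else [0] * (e - s))
--         pos = e
--     out.extend([0] * (n - pos))
--     return out
-- ===== Notes on version B (the rewrite author's own statement) =====
-- stated objective: alternative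
-- what changed: Replaces A's two in-place index sweeps (bridge gaps by back-filling, then erase short runs by a counting rescan) with a run-table algorithm: one pass merges nonzero positions into maximal one-intervals, and a single emit pass writes zero gaps and each interval as ones or zeros depending on its length, with no mutation of earlier output.
import Mathlib
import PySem

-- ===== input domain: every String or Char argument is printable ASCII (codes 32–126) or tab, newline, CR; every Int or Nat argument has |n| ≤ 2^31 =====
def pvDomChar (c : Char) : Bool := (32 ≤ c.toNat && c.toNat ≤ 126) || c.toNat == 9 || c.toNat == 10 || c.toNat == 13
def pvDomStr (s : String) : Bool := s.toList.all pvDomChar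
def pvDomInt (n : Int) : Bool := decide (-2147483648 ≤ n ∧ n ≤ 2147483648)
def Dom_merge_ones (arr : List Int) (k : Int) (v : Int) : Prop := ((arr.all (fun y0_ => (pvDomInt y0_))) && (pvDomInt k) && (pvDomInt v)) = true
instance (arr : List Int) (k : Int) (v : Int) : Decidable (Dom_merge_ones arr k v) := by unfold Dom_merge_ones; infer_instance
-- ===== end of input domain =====

-- B replaces A's two in-place index sweeps by a run-table algorithm (merge nonzero
-- positions into maximal one-intervals, then emit gaps and length-filtered runs);
-- objective: alternative decomposition; no speed claim.

-- ===== PORT A =====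
-- `for j in range(a, a+len): d[j] = c` — the two inner fill loops of A share this shape.
def pvSetRange (d : List Int) (a len : Nat) (c : Int) : List Int :=
  (List.range' a len).foldl (fun d j => d.set j c) d

-- body of A's first loop; state = (merge, last_one_index).  `last` stays an Int
-- (-1 sentinel); in the fill branch last ≠ -1, so last ≥ 0 and `last.toNat` and
-- `i - last.toNat` are exactly Python's range(last_one_index, i).
def pvStepA (arr : List Int) (k : Int) (st : List Int × Int) (i : Nat) : List Int × Int :=
  let l := arr.getD i 0
  if l = 0 then (st.1.set i 0, st.2)
  else if l = 1 ∧ st.2 ≠ -1 then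
    let m := st.1.set i 1
    let m := if (i : Int) - st.2 ≤ k then pvSetRange m st.2.toNat (i - st.2.toNat) 1 else m
    (m, (i : Int))
  else (st.1.set i 1, (i : Int))

-- body of A's second loop; state = (delect, count).  count ≥ 0 always, and
-- count ≤ i at index i, so `i - count.toNat` is exactly Python's i - count.
def pvStepD (v : Int) (st : List Int × Int) (i : Nat) : List Int × Int :=
  if st.1.getD i 0 = 1 then (st.1, st.2 + 1)
  else if 0 < st.2 ∧ st.2 < v then (pvSetRange st.1 (i - st.2.toNat) st.2.toNat 0, 0)
  else (st.1, 0)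

-- A's second sweep plus the trailing fix-up block.
def pvPhase2 (d : List Int) (v : Int) : List Int :=
  let r := (List.range d.length).foldl (pvStepD v) (d, 0)
  if 0 < r.2 ∧ r.2 < v then pvSetRange r.1 (r.1.length - r.2.toNat) r.2.toNat 0 else r.1

def merge_ones (arr : List Int) (k : Int) (v : Int) : List Int :=
  let p1 := (List.range arr.length).foldl (pvStepA arr k) (List.replicate arr.length 0, -1)
  pvPhase2 p1.1 v

-- ===== PORT B =====
def pvFlush (cur : Option (Nat × Nat)) : List (Nat × Nat) :=
  match cur with
  | some c => [c]
  | none => []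

-- B's first loop: fold the nonzero positions into maximal one-intervals [s, e).
-- Loop index i is Python's enumerate counter (always ≥ 0), kept as a Nat.
def pvRunsGo (k : Int) : List Int → Nat → List (Nat × Nat) → Option (Nat × Nat) → List (Nat × Nat)
  | [], _, runs, cur => runs ++ pvFlush cur
  | x :: rest, i, runs, cur =>
    if x = 0 then pvRunsGo k rest (i + 1) runs cur
    else
      match cur with
      | some (s, e) =>
        if i = e ∨ (x = 1 ∧ (i : Int) - ((e : Int) - 1) ≤ k) then
          pvRunsGo k rest (i + 1) runs (some (s, i + 1))
        else pvRunsGo k rest (i + 1) (runs ++ [(s, e)]) (some (i, i + 1))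
      | none => pvRunsGo k rest (i + 1) runs (some (i, i + 1))

-- B's emit loop over the run table.
def pvEmit (v : Int) : List (Nat × Nat) → List Int → Nat → Nat → List Int
  | [], out, pos, n => out ++ List.replicate (n - pos) 0
  | (s, e) :: rest, out, pos, n =>
    pvEmit v rest
      (out ++ List.replicate (s - pos) 0 ++
        (if v ≤ (e : Int) - (s : Int) then List.replicate (e - s) 1 else List.replicate (e - s) 0))
      e n

def merge_ones_alt (arr : List Int) (k : Int) (v : Int) : List Int :=
  pvEmit v (pvRunsGo k arr 0 [] none) [] 0 arr.length

-- ===== PRECONDITION & SPEC =====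
def Spec_merge_ones (arr : List Int) (k : Int) (v : Int) (out : List Int) : Prop := out = merge_ones_alt arr k v
instance (arr : List Int) (k : Int) (v : Int) (out : List Int) : Decidable (Spec_merge_ones arr k v out) := by unfold Spec_merge_ones; infer_instance

-- ===== CLAIM (what is proved, stated in full; the proofs are below) =====
def Claim_equal_merge_ones : Prop := ∀ (arr : List Int) (k : Int) (v : Int), Dom_merge_ones arr k v → Spec_merge_ones arr k v (merge_ones arr k v)

-- ===== LEMMAS AND PROOFS =====

-- the 0/1 array described by a run table (all runs kept), from position pos up to n
def pvExpand : Nat → List (Nat × Nat) → Nat → List Int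
  | pos, [], n => List.replicate (n - pos) 0
  | pos, (s, e) :: rest, n =>
    List.replicate (s - pos) 0 ++ List.replicate (e - s) 1 ++ pvExpand e rest n

-- the final output described by a run table (short runs zeroed)
def pvSpecOut : Nat → List (Nat × Nat) → Nat → Int → List Int
  | pos, [], n, _ => List.replicate (n - pos) 0
  | pos, (s, e) :: rest, n, v =>
    List.replicate (s - pos) 0 ++
      List.replicate (e - s) (if v ≤ (e : Int) - (s : Int) then 1 else 0) ++ pvSpecOut e rest n v

-- well-formed run table from pos: runs ordered, nonempty, separated by ≥ 1 zero
def pvWF : Nat → List (Nat × Nat) → Prop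
  | _, [] => True
  | pos, (s, e) :: rest => pos ≤ s ∧ s < e ∧ pvWF (e + 1) rest

def pvEndsLE (runs : List (Nat × Nat)) (n : Nat) : Prop := ∀ p ∈ runs, p.2 ≤ n

-- coupling invariant between A's phase-1 state (merge, last) and B's (runs, cur)
def pvInv (i : Nat) (runs : List (Nat × Nat)) (cur : Option (Nat × Nat)) (last : Int) : Prop :=
  match cur with
  | none => runs = [] ∧ last = -1
  | some (s, e) =>
    last = (e : Int) - 1 ∧ s < e ∧ 1 ≤ e ∧ e ≤ i ∧
      pvWF 0 (runs ++ [(s, e)]) ∧ pvEndsLE (runs ++ [(s, e)]) i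

lemma pvSetRange_mid : ∀ (M X Y : List Int) (c : Int),
    pvSetRange (X ++ (M ++ Y)) X.length M.length c = X ++ (List.replicate M.length c ++ Y) := by
  intro M
  induction M with
  | nil => intro X Y c; simp [pvSetRange]
  | cons m M ih =>
    intro X Y c
    simp only [pvSetRange, List.length_cons, List.range'_succ, List.foldl_cons]
    have hset : (X ++ (m :: (M ++ Y))).set X.length c = (X ++ [c]) ++ (M ++ Y) := by
      rw [List.set_append]
      simp
    simp only [List.cons_append] at hset ⊢
    rw [hset]
    have := ih (X ++ [c]) Y c
    simp only [pvSetRange, List.length_append, List.length_singleton, List.append_assoc,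
      List.singleton_append, List.replicate_succ] at this ⊢
    exact this

lemma pvWF_mono : ∀ (rs : List (Nat × Nat)) (p q : Nat), p ≤ q → pvWF q rs → pvWF p rs := by
  intro rs p q h hwf
  cases rs with
  | nil => trivial
  | cons a rest =>
    obtain ⟨s, e⟩ := a
    simp only [pvWF] at hwf ⊢
    exact ⟨by omega, hwf.2.1, hwf.2.2⟩

lemma pvExpand_length : ∀ (rs : List (Nat × Nat)) (pos n : Nat),
    pvWF pos rs → pvEndsLE rs n → pos ≤ n → (pvExpand pos rs n).length = n - pos := by
  intro rs
  induction rs with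
  | nil => intro pos n _ _ h; simp [pvExpand]
  | cons a rest ih =>
    intro pos n hwf hle hpn
    obtain ⟨s, e⟩ := a
    simp only [pvWF] at hwf
    have he : e ≤ n := hle (s, e) (by simp)
    have hrest : pvEndsLE rest n := fun p hp => hle p (by simp [hp])
    have := ih e n (pvWF_mono rest e (e+1) (by omega) hwf.2.2) hrest (by omega)
    simp [pvExpand, this]
    omega

lemma pvEmit_eq_specOut : ∀ (rs : List (Nat × Nat)) (out : List Int) (pos n : Nat) (v : Int),
    pvEmit v rs out pos n = out ++ pvSpecOut pos rs n v := by
  intro rs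
  induction rs with
  | nil => intro out pos n v; simp [pvEmit, pvSpecOut]
  | cons a rest ih =>
    intro out pos n v
    obtain ⟨s, e⟩ := a
    simp only [pvEmit, pvSpecOut]
    rw [ih]
    by_cases h : v ≤ (e : Int) - (s : Int) <;> simp [h, List.append_assoc]

lemma pvWF_le_start : ∀ (rs : List (Nat × Nat)) (q s e : Nat),
    pvWF q (rs ++ [(s, e)]) → q ≤ s := by
  intro rs
  induction rs with
  | nil => intro q s e h; exact h.1
  | cons b rest' ih' =>
    intro q s e h
    obtain ⟨b1, b2⟩ := b
    simp only [List.cons_append, pvWF] at h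
    have := ih' (b2 + 1) s e h.2.2
    omega

lemma pvWF_ends : ∀ (rs : List (Nat × Nat)) (pos s e : Nat),
    pvWF pos (rs ++ [(s, e)]) → pvEndsLE rs s := by
  intro rs
  induction rs with
  | nil => intro pos s e _ p hp; simp at hp
  | cons a rest ih =>
    intro pos s e hwf p hp
    obtain ⟨a1, a2⟩ := a
    simp only [List.cons_append, pvWF] at hwf
    rcases List.mem_cons.mp hp with h | h
    · subst h
      have := pvWF_le_start rest (a2 + 1) s e hwf.2.2
      omega
    · exact ih (a2 + 1) s e hwf.2.2 p h

lemma pvWF_app_one : ∀ (rs : List (Nat × Nat)) (pos s e s' e' : Nat),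
    pvWF pos (rs ++ [(s, e)]) → e < s' → s' < e' →
    pvWF pos (rs ++ [(s, e)] ++ [(s', e')]) := by
  intro rs
  induction rs with
  | nil => intro pos s e s' e' h h1 h2; simp_all [pvWF]; try omega
  | cons a rest ih =>
    intro pos s e s' e' h h1 h2
    obtain ⟨a1, a2⟩ := a
    simp only [List.cons_append, pvWF] at h ⊢
    exact ⟨h.1, h.2.1, ih (a2 + 1) s e s' e' h.2.2 h1 h2⟩

lemma pvWF_ext : ∀ (rs : List (Nat × Nat)) (pos s e e' : Nat),
    pvWF pos (rs ++ [(s, e)]) → s < e' → pvWF pos (rs ++ [(s, e')]) := by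
  intro rs
  induction rs with
  | nil => intro pos s e e' h h1; simp_all [pvWF]
  | cons a rest ih =>
    intro pos s e e' h h1
    obtain ⟨a1, a2⟩ := a
    simp only [List.cons_append, pvWF] at h ⊢
    exact ⟨h.1, h.2.1, ih (a2 + 1) s e e' h.2.2 h1⟩

lemma pvExpand_decomp : ∀ (rs : List (Nat × Nat)) (pos s e i : Nat),
    pvWF pos (rs ++ [(s, e)]) → e ≤ i →
    pvExpand pos (rs ++ [(s, e)]) i
      = pvExpand pos rs s ++ List.replicate (e - s) 1 ++ List.replicate (i - e) 0 := by
  intro rs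
  induction rs with
  | nil => intro pos s e i _ _; simp [pvExpand]
  | cons a rest ih =>
    intro pos s e i h hei
    obtain ⟨a1, a2⟩ := a
    simp only [List.cons_append, pvWF] at h
    simp only [List.cons_append, pvExpand]
    rw [ih a2 s e i (pvWF_mono _ a2 (a2+1) (by omega) h.2.2) hei]
    simp [List.append_assoc]
lemma pvGetD_mid (X : List Int) (y : Int) (Y : List Int) :
    (X ++ (y :: Y)).getD X.length 0 = y := by
  rw [List.getD_append_right _ _ _ _ (le_refl _)]
  simp

lemma pvZeros_idle : ∀ (g : Nat) (X Y : List Int) (v : Int),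
    (List.range' X.length g).foldl (pvStepD v) (X ++ (List.replicate g 0 ++ Y), 0)
      = (X ++ (List.replicate g 0 ++ Y), 0) := by
  intro g
  induction g with
  | zero => intro X Y v; simp
  | succ g ih =>
    intro X Y v
    rw [List.range'_succ]
    simp only [List.foldl_cons]
    have hread : pvStepD v (X ++ (List.replicate (g + 1) 0 ++ Y), 0) X.length
        = (X ++ (List.replicate (g + 1) 0 ++ Y), 0) := by
      simp only [pvStepD, List.replicate_succ, List.cons_append, pvGetD_mid]
      norm_num
    rw [hread]
    have hre : X ++ (List.replicate (g + 1) 0 ++ Y) = (X ++ [0]) ++ (List.replicate g 0 ++ Y) := by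
      simp [List.replicate_succ]
    rw [hre]
    have hl : X.length + 1 = (X ++ [0]).length := by simp
    rw [hl]
    exact ih (X ++ [0]) Y v

lemma pvOnes_scan : ∀ (m : Nat) (X Y : List Int) (v : Int) (c0 : Int),
    (List.range' X.length m).foldl (pvStepD v) (X ++ (List.replicate m 1 ++ Y), c0)
      = (X ++ (List.replicate m 1 ++ Y), c0 + m) := by
  intro m
  induction m with
  | zero => intro X Y v c0; simp
  | succ m ih =>
    intro X Y v c0
    rw [List.range'_succ]
    simp only [List.foldl_cons]
    have hread : pvStepD v (X ++ (List.replicate (m + 1) 1 ++ Y), c0) X.length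
        = (X ++ (List.replicate (m + 1) 1 ++ Y), c0 + 1) := by
      simp only [pvStepD, List.replicate_succ, List.cons_append, pvGetD_mid]
      norm_num
    rw [hread]
    have hre : X ++ (List.replicate (m + 1) 1 ++ Y) = (X ++ [1]) ++ (List.replicate m 1 ++ Y) := by
      simp [List.replicate_succ]
    rw [hre]
    have hl : X.length + 1 = (X ++ [1]).length := by simp
    rw [hl]
    rw [ih (X ++ [1]) Y v (c0 + 1)]
    have : c0 + 1 + (m : Int) = c0 + ((m : Nat) + 1 : Nat) := by push_cast; ring
    rw [this]
lemma pvFinalize_step (fin Z : List Int) (c : Nat) (v : Int) :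
    pvStepD v (fin ++ (List.replicate c 1 ++ (0 :: Z)), (c : Int)) (fin.length + c)
      = (fin ++ (List.replicate c (if v ≤ (c : Int) then 1 else 0) ++ (0 :: Z)), 0) := by
  have hlen : (fin ++ List.replicate c 1).length = fin.length + c := by simp
  have hread : (fin ++ (List.replicate c 1 ++ (0 :: Z))).getD (fin.length + c) 0 = 0 := by
    rw [← List.append_assoc, ← hlen, pvGetD_mid]
  have hmid := pvSetRange_mid (List.replicate c 1) fin (0 :: Z) 0
  simp only [List.length_replicate] at hmid
  simp only [pvStepD, hread]
  rw [if_neg (by norm_num : ¬ (0 : Int) = 1)]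
  by_cases h1 : (0 : Int) < (c : Int) ∧ (c : Int) < v
  · rw [if_pos h1]
    have ht : ((c : Int)).toNat = c := by simp
    rw [ht]
    have hs : fin.length + c - c = fin.length := by omega
    rw [hs, hmid]
    rw [if_neg (not_le.mpr h1.2)]
  · rw [if_neg h1]
    rcases Nat.eq_zero_or_pos c with hc | hc
    · subst hc; simp
    · have hv : v ≤ (c : Int) := by
        by_contra hcon
        exact h1 ⟨by exact_mod_cast hc, by omega⟩
      rw [if_pos hv]
lemma pvGap_go (g : Nat) (fin Y : List Int) (c : Nat) (v : Int) (h : c ≠ 0 → 1 ≤ g) :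
    (List.range' (fin.length + c) g).foldl (pvStepD v)
        (fin ++ (List.replicate c 1 ++ (List.replicate g 0 ++ Y)), (c : Int))
      = (fin ++ (List.replicate c (if v ≤ (c : Int) then 1 else 0) ++ (List.replicate g 0 ++ Y)), 0) := by
  rcases Nat.eq_zero_or_pos c with hc | hc
  · subst hc
    simpa using pvZeros_idle g fin Y v
  · have hg : 1 ≤ g := h (by omega)
    obtain ⟨g', rfl⟩ : ∃ g', g = g' + 1 := ⟨g - 1, by omega⟩
    rw [List.range'_succ, List.foldl_cons]
    have hz : List.replicate (g' + 1) (0 : Int) ++ Y = 0 :: (List.replicate g' 0 ++ Y) := by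
      simp [List.replicate_succ]
    rw [hz, pvFinalize_step]
    have hre : fin ++ (List.replicate c (if v ≤ (c : Int) then 1 else 0) ++ (0 :: (List.replicate g' 0 ++ Y)))
        = (fin ++ List.replicate c (if v ≤ (c : Int) then 1 else 0) ++ [0]) ++ (List.replicate g' 0 ++ Y) := by
      simp
    rw [hre]
    have hlen : fin.length + c + 1 = (fin ++ List.replicate c (if v ≤ (c : Int) then 1 else 0) ++ [0]).length := by
      simp
      omega
    rw [hlen]
    rw [pvZeros_idle]

lemma pvPhase2_go : ∀ (runs : List (Nat × Nat)) (fin : List Int) (c n : Nat) (v : Int),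
    pvWF (fin.length + c) runs →
    pvEndsLE runs n →
    fin.length + c ≤ n →
    (c ≠ 0 → (match runs with | [] => True | (s, _) :: _ => fin.length + c < s)) →
    (let d := fin ++ (List.replicate c 1 ++ pvExpand (fin.length + c) runs n)
     let r := (List.range' (fin.length + c) (n - (fin.length + c))).foldl (pvStepD v) (d, (c : Int))
     if 0 < r.2 ∧ r.2 < v then pvSetRange r.1 (r.1.length - r.2.toNat) r.2.toNat 0 else r.1)
      = fin ++ (List.replicate c (if v ≤ (c : Int) then 1 else 0)
          ++ pvSpecOut (fin.length + c) runs n v) := by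
  intro runs
  induction runs with
  | nil =>
    intro fin c n v _ _ hpn _
    dsimp only
    rcases Nat.eq_zero_or_pos (n - (fin.length + c)) with hg | hg
    · -- the whole array is consumed; only the trailing fix-up can act
      rw [hg]
      simp only [List.range'_zero, List.foldl_nil, pvExpand, hg, List.replicate_zero]
      by_cases h1 : (0 : Int) < (c : Int) ∧ (c : Int) < v
      · rw [if_pos h1]
        have ht : ((c : Int)).toNat = c := by simp
        have hl : (fin ++ (List.replicate c 1 ++ [])).length - ((c : Int)).toNat = fin.length := by
          simp [ht]
        rw [hl, ht]
        have := pvSetRange_mid (List.replicate c 1) fin [] 0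
        simp only [List.length_replicate] at this
        rw [this, if_neg (not_le.mpr h1.2)]
        simp [pvSpecOut, hg]
      · rw [if_neg h1]
        rcases Nat.eq_zero_or_pos c with hc | hc
        · subst hc
          simp only [pvSpecOut, List.replicate_zero, List.nil_append]
          rw [show n - (fin.length + 0) = 0 from hg]
          simp
        · have hv : v ≤ (c : Int) := by
            by_contra hcon
            exact h1 ⟨by exact_mod_cast hc, by omega⟩
          rw [if_pos hv]
          simp [pvSpecOut, hg]
    · -- a nonempty run of zeros follows: pvGap_go finalizes, nothing else happens
      simp only [pvExpand]
      have hY : List.replicate (n - (fin.length + c)) (0 : Int)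
          = List.replicate (n - (fin.length + c)) 0 ++ [] := by simp
      rw [hY, pvGap_go _ _ _ _ _ (fun _ => hg)]
      norm_num [pvSpecOut]
  | cons a rest ih =>
    intro fin c n v hwf hends hpn hgap
    obtain ⟨s, e⟩ := a
    dsimp only
    simp only [pvWF] at hwf
    obtain ⟨hps, hse, hwfr⟩ := hwf
    have he_n : e ≤ n := hends (s, e) (by simp)
    have hendr : pvEndsLE rest n := fun p hp => hends p (by simp [hp])
    have hsplit : n - (fin.length + c) = (s - (fin.length + c)) + ((e - s) + (n - e)) := by omega
    rw [hsplit, ← List.range'_append, ← List.range'_append]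
    have hs1 : fin.length + c + 1 * (s - (fin.length + c)) = s := by omega
    rw [hs1]
    have hs2 : s + 1 * (e - s) = e := by omega
    rw [hs2]
    rw [List.foldl_append, List.foldl_append]
    simp only [pvExpand]
    -- gap phase
    have hd : fin ++ (List.replicate c 1 ++ (List.replicate (s - (fin.length + c)) 0 ++ List.replicate (e - s) 1 ++ pvExpand e rest n))
        = fin ++ (List.replicate c 1 ++ (List.replicate (s - (fin.length + c)) 0 ++ (List.replicate (e - s) 1 ++ pvExpand e rest n))) := by
      simp [List.append_assoc]
    rw [hd, pvGap_go _ _ _ _ _ (fun hc0 => by have := hgap hc0; omega)]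
    -- ones phase
    have hX : s = (fin ++ (List.replicate c (if v ≤ (c : Int) then 1 else 0) ++ List.replicate (s - (fin.length + c)) 0)).length := by
      simp
      omega
    have hsh : fin ++ (List.replicate c (if v ≤ (c : Int) then 1 else 0) ++ (List.replicate (s - (fin.length + c)) 0 ++ (List.replicate (e - s) 1 ++ pvExpand e rest n)))
        = (fin ++ (List.replicate c (if v ≤ (c : Int) then 1 else 0) ++ List.replicate (s - (fin.length + c)) 0)) ++ (List.replicate (e - s) 1 ++ pvExpand e rest n) := by
      simp [List.append_assoc]
    rw [hsh]
    have hones := pvOnes_scan (e - s)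
      (fin ++ (List.replicate c (if v ≤ (c : Int) then 1 else 0) ++ List.replicate (s - (fin.length + c)) 0))
      (pvExpand e rest n) v 0
    rw [← hX] at hones
    rw [hones, zero_add]
    -- tail via IH
    have hlenX : (fin ++ (List.replicate c (if v ≤ (c : Int) then 1 else 0) ++ List.replicate (s - (fin.length + c)) 0)).length + (e - s) = e := by
      simp
      omega
    have hIH := ih (fin ++ (List.replicate c (if v ≤ (c : Int) then 1 else 0) ++ List.replicate (s - (fin.length + c)) 0)) (e - s) n v
    rw [hlenX] at hIH
    have hIH := hIH (pvWF_mono rest e (e + 1) (by omega) hwfr) hendr he_n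
      (fun _ => by
        cases rest with
        | nil => trivial
        | cons b rs => obtain ⟨b1, b2⟩ := b; exact by have := hwfr.1; omega)
    dsimp only at hIH
    rw [hIH]
    -- assemble
    simp only [pvSpecOut]
    have hcast : ((e - s : Nat) : Int) = (e : Int) - (s : Int) := by
      omega
    rw [hcast]
    simp [List.append_assoc]
lemma pvSet_mid (X : List Int) (y : Int) (Y : List Int) (c : Int) :
    (X ++ (y :: Y)).set X.length c = X ++ (c :: Y) := by
  rw [List.set_append]
  simp

lemma pvEndsLE_mono {rs : List (Nat × Nat)} {i j : Nat} (h : pvEndsLE rs i) (hij : i ≤ j) :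
    pvEndsLE rs j := fun p hp => le_trans (h p hp) hij

lemma pvWF_append_left : ∀ (rs tail : List (Nat × Nat)) (pos : Nat),
    pvWF pos (rs ++ tail) → pvWF pos rs := by
  intro rs
  induction rs with
  | nil => intro tail pos _; trivial
  | cons a rest ih =>
    intro tail pos h
    obtain ⟨a1, a2⟩ := a
    simp only [List.cons_append, pvWF] at h ⊢
    exact ⟨h.1, h.2.1, ih tail (a2 + 1) h.2.2⟩

lemma pvExpand_snoc : ∀ (rs : List (Nat × Nat)) (pos i : Nat),
    pvWF pos rs → pvEndsLE rs i → pos ≤ i →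
    pvExpand pos rs (i + 1) = pvExpand pos rs i ++ [0] := by
  intro rs
  induction rs with
  | nil =>
    intro pos i _ _ hpi
    simp only [pvExpand]
    rw [show i + 1 - pos = (i - pos) + 1 from by omega, List.replicate_succ']
  | cons a rest ih =>
    intro pos i hwf hends hpi
    obtain ⟨s, e⟩ := a
    simp only [pvWF] at hwf
    have he : e ≤ i := hends (s, e) (by simp)
    simp only [pvExpand]
    rw [ih e i (pvWF_mono rest e (e + 1) (by omega) hwf.2.2)
      (fun p hp => hends p (by simp [hp])) he]
    simp [List.append_assoc]
lemma pvPhase1_go : ∀ (rest pre : List Int) (k : Int) (runs : List (Nat × Nat))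
    (cur : Option (Nat × Nat)) (last : Int),
    pvInv pre.length runs cur last →
    ((List.range' pre.length rest.length).foldl (pvStepA (pre ++ rest) k)
        (pvExpand 0 (runs ++ pvFlush cur) pre.length ++ List.replicate rest.length 0, last)).1
      = pvExpand 0 (pvRunsGo k rest pre.length runs cur) (pre.length + rest.length)
    ∧ pvWF 0 (pvRunsGo k rest pre.length runs cur)
    ∧ pvEndsLE (pvRunsGo k rest pre.length runs cur) (pre.length + rest.length) := by
  intro rest
  induction rest with
  | nil =>
    intro pre k runs cur last hinv
    refine ⟨by simp [pvRunsGo], ?_, ?_⟩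
    · cases cur with
      | none =>
        obtain ⟨h1, _⟩ := hinv
        subst h1
        simp [pvRunsGo, pvFlush, pvWF]
      | some c =>
        obtain ⟨s, e⟩ := c
        simpa [pvRunsGo, pvFlush] using hinv.2.2.2.2.1
    · cases cur with
      | none =>
        obtain ⟨h1, _⟩ := hinv
        subst h1
        simp [pvRunsGo, pvFlush, pvEndsLE]
      | some c =>
        obtain ⟨s, e⟩ := c
        simpa [pvRunsGo, pvFlush] using hinv.2.2.2.2.2
  | cons x rest' ih =>
    intro pre k runs cur last hinv
    have hread : (pre ++ (x :: rest')).getD pre.length 0 = x := pvGetD_mid pre x rest'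
    have harr : (pre ++ [x]) ++ rest' = pre ++ x :: rest' := by simp
    have hlen2 : (pre ++ [x]).length = pre.length + 1 := by simp
    have hsum : pre.length + (rest'.length + 1) = (pre.length + 1) + rest'.length := by omega
    rw [show (x :: rest').length = rest'.length + 1 from rfl, List.range'_succ, List.foldl_cons]
    by_cases hx0 : x = 0
    · -- arr[i] == 0 : A writes the 0 already there, B skips
      have hgo : pvRunsGo k (x :: rest') pre.length runs cur
          = pvRunsGo k rest' (pre.length + 1) runs cur := by
        simp only [pvRunsGo]
        rw [if_pos hx0]
      have hwf0 : pvWF 0 (runs ++ pvFlush cur) := by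
        cases cur with
        | none => obtain ⟨h1, _⟩ := hinv; subst h1; simp [pvFlush, pvWF]
        | some c => obtain ⟨s, e⟩ := c; exact hinv.2.2.2.2.1
      have hends0 : pvEndsLE (runs ++ pvFlush cur) pre.length := by
        cases cur with
        | none => obtain ⟨h1, _⟩ := hinv; subst h1; simp [pvFlush, pvEndsLE]
        | some c => obtain ⟨s, e⟩ := c; exact hinv.2.2.2.2.2
      have hElen : (pvExpand 0 (runs ++ pvFlush cur) pre.length).length = pre.length := by
        rw [pvExpand_length _ _ _ hwf0 hends0 (Nat.zero_le _)]
        omega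
      have hstep : pvStepA (pre ++ x :: rest') k
          (pvExpand 0 (runs ++ pvFlush cur) pre.length ++ List.replicate (rest'.length + 1) 0, last)
            pre.length
          = (pvExpand 0 (runs ++ pvFlush cur) (pre.length + 1) ++ List.replicate rest'.length 0, last) := by
        simp only [pvStepA, hread]
        rw [if_pos hx0]
        have hset := pvSet_mid (pvExpand 0 (runs ++ pvFlush cur) pre.length) 0
          (List.replicate rest'.length 0) 0
        rw [hElen] at hset
        rw [List.replicate_succ, hset, pvExpand_snoc _ _ _ hwf0 hends0 (Nat.zero_le _)]
        simp
      rw [hstep, hgo, hsum]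
      have hinv' : pvInv (pre.length + 1) runs cur last := by
        cases cur with
        | none => exact hinv
        | some c =>
          obtain ⟨s, e⟩ := c
          obtain ⟨h1, h2, h3, h4, h5, h6⟩ := hinv
          exact ⟨h1, h2, h3, by omega, h5, pvEndsLE_mono h6 (by omega)⟩
      have := ih (pre ++ [x]) k runs cur last (by rw [hlen2]; exact hinv')
      rw [hlen2, harr] at this
      exact this
    · -- nonzero element
      cases cur with
      | none =>
        obtain ⟨hr0, hl0⟩ := hinv
        subst hr0
        have hgo : pvRunsGo k (x :: rest') pre.length [] none
            = pvRunsGo k rest' (pre.length + 1) [] (some (pre.length, pre.length + 1)) := by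
          simp only [pvRunsGo]
          rw [if_neg hx0]
        have hElen : (pvExpand 0 (([] : List (Nat × Nat)) ++ pvFlush none) pre.length).length = pre.length := by
          simp [pvFlush, pvExpand]
        have hstep : pvStepA (pre ++ x :: rest') k
            (pvExpand 0 (([] : List (Nat × Nat)) ++ pvFlush none) pre.length ++ List.replicate (rest'.length + 1) 0, last)
              pre.length
            = (pvExpand 0 (([] : List (Nat × Nat)) ++ pvFlush (some (pre.length, pre.length + 1))) (pre.length + 1)
                ++ List.replicate rest'.length 0, (pre.length : Int)) := by
          simp only [pvStepA, hread]
          rw [if_neg hx0, if_neg (by subst hl0; simp)]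
          have hset := pvSet_mid (pvExpand 0 (([] : List (Nat × Nat)) ++ pvFlush none) pre.length) 0
            (List.replicate rest'.length 0) 1
          rw [hElen] at hset
          rw [List.replicate_succ, hset]
          simp [pvFlush, pvExpand, List.replicate_succ']
        rw [hstep, hgo, hsum]
        have hinv' : pvInv (pre.length + 1) [] (some (pre.length, pre.length + 1)) (pre.length : Int) := by
          refine ⟨by push_cast; ring, by omega, by omega, by omega, ?_, ?_⟩
          · simp [pvWF]
          · intro p hp
            simp at hp
            subst hp
            rfl
        have := ih (pre ++ [x]) k [] (some (pre.length, pre.length + 1)) (pre.length : Int)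
          (by rw [hlen2]; exact hinv')
        rw [hlen2, harr] at this
        exact this
      | some c =>
        obtain ⟨s, e⟩ := c
        obtain ⟨hlast, hse, he1, hei, hwfa, hendsa⟩ := hinv
        have hlne : last ≠ -1 := by rw [hlast]; omega
        have hwfr : pvWF 0 runs := pvWF_append_left _ _ _ hwfa
        have hendsr : pvEndsLE runs s := pvWF_ends _ _ _ _ hwfa
        have hPlen : (pvExpand 0 runs s).length = s := by
          rw [pvExpand_length _ _ _ hwfr hendsr (Nat.zero_le _)]; omega
        have hE : pvExpand 0 (runs ++ [(s, e)]) pre.length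
            = pvExpand 0 runs s ++ List.replicate (e - s) 1 ++ List.replicate (pre.length - e) 0 :=
          pvExpand_decomp _ _ _ _ _ hwfa hei
        have hElen : (pvExpand 0 (runs ++ [(s, e)]) pre.length).length = pre.length := by
          rw [pvExpand_length _ _ _ hwfa hendsa (Nat.zero_le _)]; omega
        have hset0 := pvSet_mid (pvExpand 0 (runs ++ [(s, e)]) pre.length) 0
          (List.replicate rest'.length 0) 1
        rw [hElen] at hset0
        by_cases hmerge : pre.length = e ∨ (x = 1 ∧ (pre.length : Int) - ((e : Int) - 1) ≤ k)
        · -- B merges the nonzero at i into the current run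
          have hgo : pvRunsGo k (x :: rest') pre.length runs (some (s, e))
              = pvRunsGo k rest' (pre.length + 1) runs (some (s, pre.length + 1)) := by
            simp only [pvRunsGo]
            rw [if_neg hx0, if_pos hmerge]
          have hinv' : pvInv (pre.length + 1) runs (some (s, pre.length + 1)) (pre.length : Int) := by
            refine ⟨by push_cast; ring, by omega, by omega, by omega,
              pvWF_ext _ _ _ _ _ hwfa (by omega), ?_⟩
            intro p hp
            rcases List.mem_append.mp hp with h | h
            · exact le_trans (hendsa p (List.mem_append_left _ h)) (by omega)
            · simp at h; subst h; rfl
          have hNewE : pvExpand 0 (runs ++ [(s, pre.length + 1)]) (pre.length + 1)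
              = pvExpand 0 runs s ++ List.replicate (pre.length + 1 - s) 1 := by
            rw [pvExpand_decomp _ _ _ _ _ (pvWF_ext _ _ _ _ _ hwfa (by omega)) (by omega)]
            simp
          have hstep : pvStepA (pre ++ x :: rest') k
              (pvExpand 0 (runs ++ [(s, e)]) pre.length ++ List.replicate (rest'.length + 1) 0, last)
                pre.length
              = (pvExpand 0 (runs ++ [(s, pre.length + 1)]) (pre.length + 1)
                  ++ List.replicate rest'.length 0, (pre.length : Int)) := by
            simp only [pvStepA, hread]
            rw [if_neg hx0, hNewE]
            by_cases hx1 : x = 1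
            · rw [if_pos ⟨hx1, hlne⟩]
              by_cases hfill : (pre.length : Int) - last ≤ k
              · rw [if_pos hfill]
                rw [List.replicate_succ, hset0]
                have htn : last.toNat = e - 1 := by rw [hlast]; omega
                rw [htn]
                have hsh : pvExpand 0 (runs ++ [(s, e)]) pre.length ++ ((1 : Int) :: List.replicate rest'.length 0)
                    = (pvExpand 0 runs s ++ List.replicate (e - s - 1) 1)
                      ++ (((1 : Int) :: List.replicate (pre.length - e) 0)
                          ++ ((1 : Int) :: List.replicate rest'.length 0)) := by
                  rw [hE, show e - s = (e - s - 1) + 1 from by omega, List.replicate_succ']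
                  simp [List.append_assoc]
                rw [hsh]
                have hmid := pvSetRange_mid ((1 : Int) :: List.replicate (pre.length - e) 0)
                  (pvExpand 0 runs s ++ List.replicate (e - s - 1) 1)
                  ((1 : Int) :: List.replicate rest'.length 0) 1
                have hXlen : (pvExpand 0 runs s ++ List.replicate (e - s - 1) 1).length = e - 1 := by
                  simp [hPlen]; omega
                have hMlen : ((1 : Int) :: List.replicate (pre.length - e) 0).length
                    = pre.length - (e - 1) := by simp; omega
                rw [hXlen, hMlen] at hmid
                rw [hmid]
                have hones : List.replicate (pre.length - (e - 1)) (1 : Int)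
                      ++ ((1 : Int) :: List.replicate rest'.length 0)
                    = List.replicate (pre.length - (e - 1) + 1) 1 ++ List.replicate rest'.length 0 := by
                  rw [show pre.length - (e - 1) + 1 = pre.length - (e - 1) + 1 from rfl,
                    List.replicate_add]
                  simp
                rw [hones]
                have hfin : List.replicate (e - s - 1) (1 : Int)
                      ++ (List.replicate (pre.length - (e - 1) + 1) 1 ++ List.replicate rest'.length 0)
                    = List.replicate (pre.length + 1 - s) 1 ++ List.replicate rest'.length 0 := by
                  rw [← List.append_assoc, ← List.replicate_add,
                    show (e - s - 1) + (pre.length - (e - 1) + 1) = pre.length + 1 - s from by omega]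
                simp only [List.append_assoc]
                rw [hfin]
              · rw [if_neg hfill]
                have hie : pre.length = e := by
                  rcases hmerge with h | h
                  · exact h
                  · exact absurd (by rw [hlast]; exact h.2) hfill
                rw [List.replicate_succ, hset0, hE, ← hie]
                rw [show pre.length - pre.length = 0 from by omega]
                simp only [List.replicate_zero, List.append_nil]
                rw [show pre.length + 1 - s = (pre.length - s) + 1 from by omega,
                  List.replicate_succ', hie]
                simp [List.append_assoc]
            · rw [if_neg (fun hc => hx1 hc.1)]
              have hie : pre.length = e := by
                rcases hmerge with h | h
                · exact h
                · exact absurd h.1 hx1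
              rw [List.replicate_succ, hset0, hE, ← hie]
              rw [show pre.length - pre.length = 0 from by omega]
              simp only [List.replicate_zero, List.append_nil]
              rw [show pre.length + 1 - s = (pre.length - s) + 1 from by omega,
                List.replicate_succ', hie]
              simp [List.append_assoc]
          rw [show runs ++ pvFlush (some (s, e)) = runs ++ [(s, e)] from rfl, hstep, hgo, hsum]
          have := ih (pre ++ [x]) k runs (some (s, pre.length + 1)) (pre.length : Int)
            (by rw [hlen2]; exact hinv')
          rw [hlen2, harr] at this
          exact this
        · -- B starts a new run at i
          have hie : pre.length ≠ e := fun hcon => hmerge (Or.inl hcon)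
          have hgo : pvRunsGo k (x :: rest') pre.length runs (some (s, e))
              = pvRunsGo k rest' (pre.length + 1) (runs ++ [(s, e)])
                  (some (pre.length, pre.length + 1)) := by
            simp only [pvRunsGo]
            rw [if_neg hx0, if_neg hmerge]
          have hwf' : pvWF 0 ((runs ++ [(s, e)]) ++ [(pre.length, pre.length + 1)]) :=
            pvWF_app_one _ _ _ _ _ _ hwfa (by omega) (by omega)
          have hinv' : pvInv (pre.length + 1) (runs ++ [(s, e)])
              (some (pre.length, pre.length + 1)) (pre.length : Int) := by
            refine ⟨by push_cast; ring, by omega, by omega, by omega, hwf', ?_⟩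
            intro p hp
            rcases List.mem_append.mp hp with h | h
            · exact le_trans (hendsa p h) (by omega)
            · simp at h; subst h; rfl
          have hNewE : pvExpand 0 ((runs ++ [(s, e)]) ++ [(pre.length, pre.length + 1)]) (pre.length + 1)
              = pvExpand 0 (runs ++ [(s, e)]) pre.length ++ [1] := by
            rw [pvExpand_decomp _ _ _ _ _ hwf' (by omega)]
            simp
          have hstep : pvStepA (pre ++ x :: rest') k
              (pvExpand 0 (runs ++ [(s, e)]) pre.length ++ List.replicate (rest'.length + 1) 0, last)
                pre.length
              = (pvExpand 0 ((runs ++ [(s, e)]) ++ [(pre.length, pre.length + 1)]) (pre.length + 1)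
                  ++ List.replicate rest'.length 0, (pre.length : Int)) := by
            rw [hNewE]
            simp only [pvStepA, hread]
            rw [if_neg hx0]
            by_cases hx1 : x = 1
            · have hnofill : ¬ ((pre.length : Int) - last ≤ k) := by
                rw [hlast]
                intro hcon
                exact hmerge (Or.inr ⟨hx1, hcon⟩)
              rw [if_pos ⟨hx1, hlne⟩]
              simp only [if_neg hnofill]
              rw [List.replicate_succ, hset0]
              simp
            · rw [if_neg (fun hc => hx1 hc.1)]
              rw [List.replicate_succ, hset0]
              simp
          rw [show runs ++ pvFlush (some (s, e)) = runs ++ [(s, e)] from rfl, hstep, hgo, hsum]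
          have := ih (pre ++ [x]) k (runs ++ [(s, e)]) (some (pre.length, pre.length + 1))
            (pre.length : Int) (by rw [hlen2]; exact hinv')
          rw [hlen2, harr] at this
          exact this
theorem merge_ones_eq_alt : ∀ (arr : List Int) (k v : Int), merge_ones arr k v = merge_ones_alt arr k v := by
  intro arr k v
  have h1 := pvPhase1_go arr [] k [] none (-1) ⟨rfl, rfl⟩
  simp only [List.length_nil, List.nil_append, Nat.zero_add] at h1
  obtain ⟨hm, hwf, hends⟩ := h1
  have hE0 : pvExpand 0 (pvFlush none) 0 = [] := by
    simp [pvFlush, pvExpand]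
  rw [hE0, List.nil_append] at hm
  have hlen : (pvExpand 0 (pvRunsGo k arr 0 [] none) arr.length).length = arr.length := by
    rw [pvExpand_length _ _ _ hwf hends (Nat.zero_le _)]
    omega
  have h2 := pvPhase2_go (pvRunsGo k arr 0 [] none) [] 0 arr.length v
    (by simpa using hwf) hends (by simp) (by simp)
  simp only [List.length_nil, Nat.add_zero, List.replicate_zero, List.nil_append,
    Nat.sub_zero, Nat.cast_zero] at h2
  simp only [merge_ones, pvPhase2]
  rw [List.range_eq_range', hm, hlen, List.range_eq_range']
  rw [h2]
  simp only [merge_ones_alt]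
  rw [pvEmit_eq_specOut]
  simp

-- ===== VERDICT (by name: the statement is the Claim_ definition above) =====
theorem merge_ones_spec : Claim_equal_merge_ones := by
  intro arr k v _
  show merge_ones arr k v = merge_ones_alt arr k v
  exact merge_ones_eq_alt arr k v
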